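-- pv_equiv track=rewrite | github.com/lelilia/advent_of_code_2015 | day24.py | get_minimal_length_for_n_piles
-- ===== SOURCE A (Python) =====
-- from itertools import combinations
--
-- def get_minimal_length_for_n_piles(presents, target_sum):
--     min_number_of_presents = len(presents)
--
--     for num_packages in range(1, len(presents)):
--         if min_number_of_presents <= num_packages:
--             continue
--         for combination in combinations(presents, num_packages):
--             if sum(combination) == target_sum and min_number_of_presents > len(
--                 combination
--             ):
--                 min_number_of_presents = len(combination)
--     return min_number_of_presents
-- ===== SOURCE B (Python) =====
-- def get_minimal_length_for_n_piles(presents, target_sum):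
--     # subset-sum DP: best[s] = minimal number of presents in a nonempty subset summing to s
--     best = {}
--     for p in presents:
--         upd = {p: 1}
--         for s, c in best.items():
--             ns, nc = s + p, c + 1
--             if ns not in upd or nc < upd[ns]:
--                 upd[ns] = nc
--         for s, c in upd.items():
--             if s not in best or c < best[s]:
--                 best[s] = c
--     return best.get(target_sum, len(presents))
-- ===== Notes on version B (the rewrite author's own statement) =====
-- stated objective: faster
-- what changed: Replaced the exponential enumeration of all k-combinations for every k with a one-pass 0/1 subset-sum dynamic programme over a dict mapping each reachable sum to the minimal number of presents achieving it.
import Mathlib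
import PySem

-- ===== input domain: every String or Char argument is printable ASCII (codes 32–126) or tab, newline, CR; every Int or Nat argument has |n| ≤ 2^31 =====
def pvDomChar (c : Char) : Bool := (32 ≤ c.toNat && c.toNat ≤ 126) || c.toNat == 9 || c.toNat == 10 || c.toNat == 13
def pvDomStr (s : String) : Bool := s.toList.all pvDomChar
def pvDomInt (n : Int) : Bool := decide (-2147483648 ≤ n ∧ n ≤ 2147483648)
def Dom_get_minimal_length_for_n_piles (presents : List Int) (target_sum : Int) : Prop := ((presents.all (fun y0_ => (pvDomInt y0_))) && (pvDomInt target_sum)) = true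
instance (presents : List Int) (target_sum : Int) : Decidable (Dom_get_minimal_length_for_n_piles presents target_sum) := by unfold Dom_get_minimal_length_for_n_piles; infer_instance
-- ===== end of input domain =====

-- B replaces A's exponential enumeration of all k-combinations with a one-pass
-- 0/1 subset-sum dynamic programme (dict: reachable sum ↦ minimal item count); objective: faster.

-- ===== PORT A =====
-- itertools.combinations(xs, k) as a list of the length-k subsequences (itertools order)
def pvCombos : Nat → List Int → List (List Int)
  | 0, _ => [[]]
  | _ + 1, [] => []
  | k + 1, x :: xs => (pvCombos k xs).map (fun c => x :: c) ++ pvCombos (k + 1) xs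

def get_minimal_length_for_n_piles (presents : List Int) (target_sum : Int) : Int :=
  (PySem.List.pyRange 1 (presents.length : Int) 1).foldl
    (fun m k =>
      if m ≤ k then m
      else
        (pvCombos k.toNat presents).foldl
          (fun m c =>
            if c.sum = target_sum ∧ m > (c.length : Int) then (c.length : Int) else m)
          m)
    (presents.length : Int)

-- ===== PORT B =====
-- 'if s not in d or c < d[s]: d[s] = c'
def pvMinIns (d : PySem.Dict Int Int) (s c : Int) : PySem.Dict Int Int :=
  match d.get? s with
  | none => d.insert s c
  | some c' => if c < c' then d.insert s c else d

def get_minimal_length_for_n_piles_alt (presents : List Int) (target_sum : Int) : Int :=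
  let best := presents.foldl
    (fun (best : PySem.Dict Int Int) p =>
      let upd := best.items.foldl
        (fun u sc => pvMinIns u (sc.1 + p) (sc.2 + 1))
        ((PySem.Dict.empty).insert p 1)
      upd.items.foldl (fun b sc => pvMinIns b sc.1 sc.2) best)
    PySem.Dict.empty
  best.getD target_sum (presents.length : Int)

-- ===== PRECONDITION & SPEC =====
def Spec_get_minimal_length_for_n_piles (presents : List Int) (target_sum : Int) (out : Int) : Prop := out = get_minimal_length_for_n_piles_alt presents target_sum
instance (presents : List Int) (target_sum : Int) (out : Int) : Decidable (Spec_get_minimal_length_for_n_piles presents target_sum out) := by unfold Spec_get_minimal_length_for_n_piles; infer_instance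

-- ===== CLAIM (what is proved, stated in full; the proofs are below) =====
def Claim_equal_get_minimal_length_for_n_piles : Prop := ∀ (presents : List Int) (target_sum : Int), Dom_get_minimal_length_for_n_piles presents target_sum → Spec_get_minimal_length_for_n_piles presents target_sum (get_minimal_length_for_n_piles presents target_sum)

-- ===== LEMMAS AND PROOFS =====

-- `Reach l t c`: some nonempty subsequence of `l` sums to `t` and has length `c`.
def Reach (l : List Int) (t : Int) (c : Int) : Prop :=
  ∃ sub : List Int, sub.Sublist l ∧ sub ≠ [] ∧ sub.sum = t ∧ (sub.length : Int) = c

-- The value both programs compute: the least reachable count, defaulting to `l.length`.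
def Good (l : List Int) (t : Int) (v : Int) : Prop :=
  (Reach l t v ∨ v = (l.length : Int)) ∧ ∀ c, Reach l t c → v ≤ c

theorem Reach_le_length {l : List Int} {t c : Int} (h : Reach l t c) : c ≤ (l.length : Int) := by
  obtain ⟨sub, hsub, -, -, hlen⟩ := h
  have := hsub.length_le
  omega

theorem Good_unique {l : List Int} {t v w : Int} (hv : Good l t v) (hw : Good l t w) : v = w := by
  obtain ⟨hv1, hv2⟩ := hv
  obtain ⟨hw1, hw2⟩ := hw
  rcases hv1 with hv1 | hv1 <;> rcases hw1 with hw1 | hw1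
  · have := hv2 _ hw1; have := hw2 _ hv1; omega
  · have := hw2 _ hv1; have := Reach_le_length hv1; omega
  · have := hv2 _ hw1; have := Reach_le_length hw1; omega
  · omega

-- ---------- A-side ----------

theorem mem_pvCombos {k : Nat} {xs ys : List Int} :
    ys ∈ pvCombos k xs ↔ ys.Sublist xs ∧ ys.length = k := by
  induction xs generalizing k ys with
  | nil =>
    cases k with
    | zero =>
      constructor
      · intro h
        have : ys = [] := by simpa [pvCombos] using h
        subst this
        exact ⟨List.Sublist.refl _, rfl⟩
      · rintro ⟨h, -⟩
        have : ys = [] := List.sublist_nil.mp h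
        subst this
        simp [pvCombos]
    | succ k =>
      constructor
      · intro h; exact absurd h (by simp [pvCombos])
      · rintro ⟨h, hl⟩
        have : ys = [] := List.sublist_nil.mp h
        subst this
        simp at hl
  | cons x xs ih =>
    cases k with
    | zero =>
      constructor
      · intro h
        have : ys = [] := by simpa [pvCombos] using h
        subst this
        exact ⟨List.nil_sublist _, rfl⟩
      · rintro ⟨-, hl⟩
        have : ys = [] := List.eq_nil_of_length_eq_zero hl
        subst this
        simp [pvCombos]
    | succ k =>
      simp only [pvCombos, List.mem_append, List.mem_map]
      constructor
      · rintro (⟨c, hc, rfl⟩ | h)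
        · obtain ⟨h1, h2⟩ := ih.mp hc
          exact ⟨List.cons_sublist_cons.mpr h1, by simp [h2]⟩
        · obtain ⟨h1, h2⟩ := ih.mp h
          exact ⟨h1.trans (List.sublist_cons_self x xs), h2⟩
      · rintro ⟨hsub, hlen⟩
        rcases List.sublist_cons_iff.mp hsub with h | ⟨r, rfl, hr⟩
        · exact Or.inr (ih.mpr ⟨h, hlen⟩)
        · exact Or.inl ⟨r, ih.mpr ⟨hr, by simpa using hlen⟩, rfl⟩

-- the inner loop over combinations of one size k
theorem inner_fold (t : Int) (k : Nat) :
    ∀ (L : List (List Int)) (m : Int), (∀ c ∈ L, c.length = k) →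
      L.foldl (fun m c => if c.sum = t ∧ m > (c.length : Int) then (c.length : Int) else m) m
        = if (∃ c ∈ L, c.sum = t) ∧ (k : Int) < m then (k : Int) else m := by
  intro L
  induction L with
  | nil =>
    intro m _
    simp only [List.foldl_nil]
    rw [if_neg (by rintro ⟨⟨c, hc, -⟩, -⟩; exact absurd hc (List.not_mem_nil))]
  | cons c L ih =>
    intro m hlen
    have hck : c.length = k := hlen c (by simp)
    have hL : ∀ c' ∈ L, c'.length = k := fun c' h => hlen c' (by simp [h])
    simp only [List.foldl_cons]
    by_cases hc : c.sum = t ∧ m > (c.length : Int)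
    · rw [if_pos hc, ih _ hL, hck]
      rw [if_neg (by rintro ⟨-, h⟩; omega)]
      rw [if_pos ⟨⟨c, by simp, hc.1⟩, by have := hc.2; rw [hck] at this; omega⟩]
    · rw [if_neg hc, ih _ hL]
      by_cases hm : (k : Int) < m
      · by_cases hsum : c.sum = t
        · exact absurd ⟨hsum, by rw [hck]; omega⟩ hc
        · have hiff : (∃ c' ∈ c :: L, c'.sum = t) ↔ (∃ c' ∈ L, c'.sum = t) := by
            constructor
            · rintro ⟨c', hc', hs⟩
              rcases List.mem_cons.mp hc' with rfl | h
              · exact absurd hs hsum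
              · exact ⟨c', h, hs⟩
            · rintro ⟨c', h, hs⟩
              exact ⟨c', List.mem_cons_of_mem _ h, hs⟩
          simp only [hiff]
      · rw [if_neg (by rintro ⟨-, h⟩; omega), if_neg (by rintro ⟨-, h⟩; omega)]

def pvStep (l : List Int) (t : Int) (m k : Int) : Int :=
  if m ≤ k then m
  else
    (pvCombos k.toNat l).foldl
      (fun m c => if c.sum = t ∧ m > (c.length : Int) then (c.length : Int) else m) m

-- `ReachK l t k`: some subsequence of length k.toNat sums to t
def ReachK (l : List Int) (t k : Int) : Prop :=
  ∃ sub : List Int, sub.Sublist l ∧ sub.length = k.toNat ∧ sub.sum = t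

theorem ReachK_iff {l : List Int} {t k : Int} :
    ReachK l t k ↔ ∃ c ∈ pvCombos k.toNat l, c.sum = t := by
  constructor
  · rintro ⟨sub, h1, h2, h3⟩
    exact ⟨sub, mem_pvCombos.mpr ⟨h1, h2⟩, h3⟩
  · rintro ⟨c, hc, hs⟩
    obtain ⟨h1, h2⟩ := mem_pvCombos.mp hc
    exact ⟨c, h1, h2, hs⟩

theorem pvStep_eq (l : List Int) (t : Int) (m k : Int) (hk : 0 ≤ k) :
    pvStep l t m k = if (∃ c ∈ pvCombos k.toNat l, c.sum = t) ∧ k < m then k else m := by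
  unfold pvStep
  have hcast : ((k.toNat : Nat) : Int) = k := by omega
  by_cases hle : m ≤ k
  · rw [if_pos hle, if_neg (by rintro ⟨-, h⟩; omega)]
  · rw [if_neg hle]
    rw [inner_fold t k.toNat _ m (fun c hc => (mem_pvCombos.mp hc).2), hcast]

theorem foldl_pvStep_le (l : List Int) (t : Int) :
    ∀ (ks : List Int) (m : Int), (∀ k ∈ ks, 0 ≤ k) →
      (ks.foldl (pvStep l t) m ≤ m ∧
       (ks.foldl (pvStep l t) m = m ∨ ∃ k ∈ ks, ReachK l t k ∧ ks.foldl (pvStep l t) m = k) ∧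
       (∀ k ∈ ks, ReachK l t k → ks.foldl (pvStep l t) m ≤ k)) := by
  intro ks
  induction ks with
  | nil =>
    intro m _
    refine ⟨le_refl m, Or.inl rfl, ?_⟩
    intro k hk
    exact absurd hk (List.not_mem_nil)
  | cons k ks ih =>
    intro m hpos
    have hk : 0 ≤ k := hpos k (by simp)
    have hks : ∀ k' ∈ ks, 0 ≤ k' := fun k' h => hpos k' (by simp [h])
    simp only [List.foldl_cons]
    obtain ⟨ih1, ih2, ih3⟩ := ih (pvStep l t m k) hks
    have hstep : pvStep l t m k = if (∃ c ∈ pvCombos k.toNat l, c.sum = t) ∧ k < m then k else m :=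
      pvStep_eq l t m k hk
    have hstep_le : pvStep l t m k ≤ m := by rw [hstep]; split_ifs with h; omega; omega
    refine ⟨le_trans ih1 hstep_le, ?_, ?_⟩
    · rcases ih2 with h | ⟨k', hk', hr', heq⟩
      · rw [h, hstep]
        split_ifs with hcond
        · exact Or.inr ⟨k, by simp, ReachK_iff.mpr hcond.1, rfl⟩
        · exact Or.inl rfl
      · exact Or.inr ⟨k', by simp [hk'], hr', heq⟩
    · intro k' hk' hr'
      rcases List.mem_cons.mp hk' with heq | hmem
      · subst heq
        have hle : pvStep l t m k' ≤ k' := by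
          rw [hstep]
          split_ifs with h
          · omega
          · rcases le_or_gt m k' with h' | h'
            · exact h'
            · exact absurd ⟨ReachK_iff.mp hr', by omega⟩ h
        exact le_trans ih1 hle
      · exact ih3 k' hmem hr'

theorem A_good (l : List Int) (t : Int) : Good l t (get_minimal_length_for_n_piles l t) := by
  have hpos : ∀ k ∈ PySem.List.pyRange 1 (l.length : Int) 1, 0 ≤ k := by
    intro k hk
    have := (PySem.List.mem_pyRange_one).mp hk
    omega
  have hA : get_minimal_length_for_n_piles l t
      = (PySem.List.pyRange 1 (l.length : Int) 1).foldl (pvStep l t) (l.length : Int) := by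
    unfold get_minimal_length_for_n_piles pvStep
    rfl
  obtain ⟨h1, h2, h3⟩ := foldl_pvStep_le l t (PySem.List.pyRange 1 (l.length : Int) 1) (l.length : Int) hpos
  rw [← hA] at h1 h2 h3
  constructor
  · rcases h2 with h | ⟨k, hk, hr, heq⟩
    · exact Or.inr h
    · obtain ⟨hk1, hk2⟩ := PySem.List.mem_pyRange_one.mp hk
      obtain ⟨sub, hs1, hs2, hs3⟩ := hr
      refine Or.inl ⟨sub, hs1, ?_, hs3, by omega⟩
      intro hnil
      subst hnil
      simp at hs2
      omega
  · intro c hc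
    obtain ⟨sub, hs1, hs2, hs3, hs4⟩ := hc
    have hlen1 : 1 ≤ sub.length := by
      cases sub with
      | nil => exact absurd rfl hs2
      | cons a b => simp
    have hlenle : sub.length ≤ l.length := hs1.length_le
    by_cases hlt : sub.length < l.length
    · have hmem : c ∈ PySem.List.pyRange 1 (l.length : Int) 1 := by
        rw [PySem.List.mem_pyRange_one]
        omega
      exact h3 c hmem ⟨sub, hs1, by omega, hs3⟩
    · omega

-- ---------- B-side ----------

-- minimum of two optional counts
def optMin : Option Int → Option Int → Option Int
  | none, b => b
  | some a, none => some a
  | some a, some b => some (min a b)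

-- minimal count of a nonempty subsequence of l summing to s (front recursion)
def mspec : List Int → Int → Option Int
  | [], _ => none
  | p :: rest, s =>
      optMin (mspec rest s)
        (optMin (if s = p then some 1 else none) ((mspec rest (s - p)).map (· + 1)))

theorem optMin_eq_some {a b : Option Int} {c : Int} (h : optMin a b = some c) :
    a = some c ∨ b = some c := by
  match a, b with
  | none, b => exact Or.inr h
  | some x, none => exact Or.inl h
  | some x, some y =>
    simp [optMin] at h
    rcases min_choice x y with hm | hm <;> rw [hm] at h <;> simp [h]
  
theorem optMin_le_left {a b : Option Int} {c : Int} (h : a = some c) :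
    ∃ m, optMin a b = some m ∧ m ≤ c := by
  subst h
  match b with
  | none => exact ⟨c, rfl, le_refl c⟩
  | some y => exact ⟨min c y, rfl, min_le_left _ _⟩

theorem optMin_le_right {a b : Option Int} {c : Int} (h : b = some c) :
    ∃ m, optMin a b = some m ∧ m ≤ c := by
  subst h
  match a with
  | none => exact ⟨c, rfl, le_refl c⟩
  | some x => exact ⟨min x c, rfl, min_le_right _ _⟩

theorem mspec_reach : ∀ (l : List Int) (s c : Int), mspec l s = some c → Reach l s c := by
  intro l
  induction l with
  | nil => intro s c h; simp [mspec] at h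
  | cons p rest ih =>
    intro s c h
    rcases optMin_eq_some h with h1 | h1
    · obtain ⟨sub, hs1, hs2, hs3, hs4⟩ := ih s c h1
      exact ⟨sub, hs1.trans (List.sublist_cons_self p rest), hs2, hs3, hs4⟩
    rcases optMin_eq_some h1 with h2 | h2
    · by_cases hsp : s = p
      · rw [if_pos hsp] at h2
        cases h2
        exact ⟨[p], by simp, by simp, by simp [hsp], by simp⟩
      · rw [if_neg hsp] at h2
        cases h2
    · rw [Option.map_eq_some_iff] at h2
      obtain ⟨c', hc', rfl⟩ := h2
      obtain ⟨sub, hs1, hs2, hs3, hs4⟩ := ih (s - p) c' hc'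
      refine ⟨p :: sub, List.cons_sublist_cons.mpr hs1, by simp, ?_, ?_⟩
      · rw [List.sum_cons, hs3]
        ring
      · simp only [List.length_cons]
        push_cast
        omega

theorem reach_mspec : ∀ (l : List Int) (s c : Int), Reach l s c →
    ∃ m, mspec l s = some m ∧ m ≤ c := by
  intro l
  induction l with
  | nil =>
    intro s c h
    obtain ⟨sub, hs1, hs2, -, -⟩ := h
    rw [List.sublist_nil] at hs1
    exact absurd hs1 hs2
  | cons p rest ih =>
    intro s c h
    obtain ⟨sub, hs1, hs2, hs3, hs4⟩ := h
    rcases List.sublist_cons_iff.mp hs1 with hsub | ⟨r, rfl, hr⟩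
    · obtain ⟨m, hm1, hm2⟩ := ih s c ⟨sub, hsub, hs2, hs3, hs4⟩
      obtain ⟨m', hm'1, hm'2⟩ := optMin_le_left (b :=
        optMin (if s = p then some 1 else none) ((mspec rest (s - p)).map (· + 1))) hm1
      exact ⟨m', hm'1, le_trans hm'2 hm2⟩
    · cases r with
      | nil =>
        have hsp : s = p := by simpa using hs3.symm
        have h1 : optMin (if s = p then some 1 else none) ((mspec rest (s - p)).map (· + 1))
            = some 1 ∨ ∃ y, optMin (if s = p then some 1 else none) ((mspec rest (s - p)).map (· + 1)) = some y ∧ y ≤ 1 := by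
          rcases optMin_le_left (a := (if s = p then some 1 else none))
            (b := (mspec rest (s - p)).map (· + 1))
            (c := 1) (by rw [if_pos hsp]) with ⟨y, hy1, hy2⟩
          exact Or.inr ⟨y, hy1, hy2⟩
        rcases h1 with h1 | ⟨y, hy1, hy2⟩
        · obtain ⟨m', hm'1, hm'2⟩ := optMin_le_right (a := mspec rest s) h1
          refine ⟨m', hm'1, ?_⟩
          simp at hs4; omega
        · obtain ⟨m', hm'1, hm'2⟩ := optMin_le_right (a := mspec rest s) hy1
          refine ⟨m', hm'1, ?_⟩
          simp at hs4; omega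
      | cons a r' =>
        have hreach : Reach rest (s - p) (c - 1) := by
          refine ⟨a :: r', hr, by simp, ?_, ?_⟩
          · simp at hs3 ⊢; omega
          · simp at hs4 ⊢; omega
        obtain ⟨m, hm1, hm2⟩ := ih (s - p) (c - 1) hreach
        have hmap : (mspec rest (s - p)).map (· + 1) = some (m + 1) := by rw [hm1]; rfl
        obtain ⟨y, hy1, hy2⟩ := optMin_le_right (a := (if s = p then some 1 else none)) hmap
        obtain ⟨m', hm'1, hm'2⟩ := optMin_le_right (a := mspec rest s) hy1
        exact ⟨m', hm'1, by omega⟩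

-- mspec over the reversed list equals mspec (Reach is reversal-invariant); we relate the
-- dict loop (which appends elements on the right) to mspec of the reverse.

theorem Reach_reverse (l : List Int) (s c : Int) : Reach l.reverse s c ↔ Reach l s c := by
  constructor
  · rintro ⟨sub, h1, h2, h3, h4⟩
    exact ⟨sub.reverse, by simpa using h1.reverse, by simpa using h2, by simpa using h3, by simpa using h4⟩
  · rintro ⟨sub, h1, h2, h3, h4⟩
    exact ⟨sub.reverse, by simpa using h1.reverse, by simpa using h2, by simpa using h3, by simpa using h4⟩

-- combine an existing optional count with a new candidate (the min-insert value)
def pvComb (o : Option Int) (c : Int) : Int :=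
  match o with
  | none => c
  | some c' => min c' c

-- get? after one pvMinIns
theorem get?_pvMinIns (d : PySem.Dict Int Int) (s c x : Int) :
    (pvMinIns d s c).get? x =
      if x = s then some (pvComb (d.get? s) c) else d.get? x := by
  unfold pvMinIns
  cases hd : d.get? s with
  | none =>
    dsimp only
    rw [PySem.Dict.get?_insert]
    by_cases h : x = s
    · rw [if_pos h, if_pos h]
      rfl
    · rw [if_neg h, if_neg h]
  | some c' =>
    dsimp only
    by_cases hlt : c < c'
    · rw [if_pos hlt, PySem.Dict.get?_insert]
      by_cases h : x = s
      · rw [if_pos h, if_pos h]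
        simp only [pvComb]
        congr 1
        omega
      · rw [if_neg h, if_neg h]
    · rw [if_neg hlt]
      by_cases h : x = s
      · rw [if_pos h, h, hd]
        simp only [pvComb]
        congr 1
        omega
      · rw [if_neg h]

-- a fold of pvMinIns over a list of entries with pairwise-distinct keys: the lookup at x is
-- combined with the (at most one) entry whose key is x
theorem get?_pvMinIns_foldl (key val : Int × Int → Int) :
    ∀ (L : List (Int × Int)) (u : PySem.Dict Int Int) (x : Int),
      (L.map key).Nodup →
      (L.foldl (fun u sc => pvMinIns u (key sc) (val sc)) u).get? x =
        match L.find? (fun sc => key sc == x) with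
        | none => u.get? x
        | some sc => some (pvComb (u.get? x) (val sc)) := by
  intro L
  induction L with
  | nil => intro u x _; simp
  | cons hd tl ih =>
    intro u x hnd
    simp only [List.map_cons, List.nodup_cons] at hnd
    obtain ⟨hnotin, hndtl⟩ := hnd
    simp only [List.foldl_cons]
    rw [ih _ x hndtl]
    by_cases hkey : key hd = x
    · have hfind : List.find? (fun sc => key sc == x) (hd :: tl) = some hd := by
        simp [hkey]
      rw [hfind]
      have htl : List.find? (fun sc => key sc == x) tl = none := by
        rw [List.find?_eq_none]
        intro sc hsc
        simp only [beq_iff_eq]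
        intro heq
        exact hnotin (by rw [hkey, ← heq]; exact List.mem_map_of_mem hsc)
      rw [htl]
      rw [get?_pvMinIns, if_pos hkey.symm, hkey]
    · have hfind : List.find? (fun sc => key sc == x) (hd :: tl) = List.find? (fun sc => key sc == x) tl := by
        simp [hkey]
      rw [hfind]
      rw [get?_pvMinIns, if_neg (fun h => hkey h.symm)]

theorem nodup_keys_pvMinIns (d : PySem.Dict Int Int) (s c : Int) (h : d.keys.Nodup) :
    (pvMinIns d s c).keys.Nodup := by
  unfold pvMinIns
  cases d.get? s with
  | none => exact PySem.Dict.nodup_keys_insert d s c h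
  | some c' =>
    dsimp only
    split_ifs
    · exact PySem.Dict.nodup_keys_insert d s c h
    · exact h

theorem nodup_keys_pvMinIns_foldl (key val : Int × Int → Int) :
    ∀ (L : List (Int × Int)) (u : PySem.Dict Int Int), u.keys.Nodup →
      (L.foldl (fun u sc => pvMinIns u (key sc) (val sc)) u).keys.Nodup := by
  intro L
  induction L with
  | nil => intro u h; exact h
  | cons hd tl ih =>
    intro u h
    exact ih _ (nodup_keys_pvMinIns _ _ _ h)

-- find? on a dict's items equals get?
theorem find?_items_eq_get? (d : PySem.Dict Int Int) (hnd : d.keys.Nodup) (y : Int) :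
    d.items.find? (fun sc => sc.1 == y) = (d.get? y).map (fun c => (y, c)) := by
  cases hget : d.get? y with
  | some c =>
    have hmem : (y, c) ∈ d.items := PySem.Dict.mem_items_of_get?_eq_some d hget
    simp only [Option.map_some]
    cases hfind : d.items.find? (fun sc => sc.1 == y) with
    | none =>
      rw [List.find?_eq_none] at hfind
      exact absurd (by simp : ((y, c).1 == y) = true) (hfind _ hmem)
    | some sc =>
      have h1 : sc.1 = y := by simpa using List.find?_some hfind
      have h2 : sc ∈ d.items := List.mem_of_find?_eq_some hfind
      have h3 : d.get? sc.1 = some sc.2 := PySem.Dict.get?_of_mem_items d h2 hnd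
      rw [h1, hget] at h3
      have h4 : sc.2 = c := (Option.some.inj h3).symm
      rw [← h1, ← h4]
  | none =>
    simp only [Option.map_none]
    rw [List.find?_eq_none]
    intro sc hsc h
    have heq : sc.1 = y := by simpa using h
    have h3 : d.get? sc.1 = some sc.2 := PySem.Dict.get?_of_mem_items d hsc hnd
    rw [heq, hget] at h3
    simp at h3

-- one step of B's loop, at the level of get?
theorem step_get? (d : PySem.Dict Int Int) (hnd : d.keys.Nodup) (p x : Int) :
    ((d.items.foldl (fun u sc => pvMinIns u (sc.1 + p) (sc.2 + 1))
        ((PySem.Dict.empty).insert p 1)).items.foldl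
      (fun b sc => pvMinIns b sc.1 sc.2) d).get? x =
    optMin (d.get? x)
      (optMin (if x = p then some 1 else none) ((d.get? (x - p)).map (· + 1))) := by
  set upd := d.items.foldl (fun u sc => pvMinIns u (sc.1 + p) (sc.2 + 1))
      ((PySem.Dict.empty).insert p 1) with hupd
  have hnd0 : ((PySem.Dict.empty : PySem.Dict Int Int).insert p 1).keys.Nodup :=
    PySem.Dict.nodup_keys_insert _ p 1 PySem.Dict.nodup_keys_empty
  have hndupd : upd.keys.Nodup :=
    nodup_keys_pvMinIns_foldl (fun sc => sc.1 + p) (fun sc => sc.2 + 1) d.items _ hnd0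
  have hkeysnd : (d.items.map (fun sc => sc.1 + p)).Nodup := by
    have h1 : d.items.map (fun sc : Int × Int => sc.1 + p)
        = (d.items.map (fun sc : Int × Int => sc.1)).map (· + p) := by
      rw [List.map_map]
      rfl
    rw [h1]
    have h2 : (d.items.map (fun sc : Int × Int => sc.1)).Nodup := by
      simpa only [PySem.Dict.keys] using hnd
    exact h2.map (fun a b h => by omega)
  have hbase : ∀ y, ((PySem.Dict.empty : PySem.Dict Int Int).insert p 1).get? y
      = if y = p then some 1 else none := by
    intro y
    rw [PySem.Dict.get?_insert]
    split_ifs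
    · rfl
    · exact PySem.Dict.get?_empty y
  have hupdget : ∀ y, upd.get? y =
      optMin (if y = p then some 1 else none) ((d.get? (y - p)).map (· + 1)) := by
    intro y
    rw [hupd, get?_pvMinIns_foldl (fun sc => sc.1 + p) (fun sc => sc.2 + 1) d.items _ y hkeysnd]
    have hpred : (fun (sc : Int × Int) => sc.1 + p == y) = (fun sc => sc.1 == y - p) := by
      funext sc
      by_cases h : sc.1 = y - p
      · have h2 : sc.1 + p = y := by omega
        simp [h]
      · have h2 : ¬ sc.1 + p = y := by omega
        simp [h, h2]
    rw [hpred, find?_items_eq_get? d hnd (y - p)]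
    cases hdy : d.get? (y - p) with
    | none =>
      simp only [Option.map_none]
      by_cases hyp : y = p
      · rw [hbase y, if_pos hyp]
        rfl
      · rw [hbase y, if_neg hyp]
        rfl
    | some c =>
      simp only [Option.map_some]
      by_cases hyp : y = p
      · rw [hbase y, if_pos hyp]
        rfl
      · rw [hbase y, if_neg hyp]
        rfl
  have hkeys2 : (upd.items.map (fun sc : Int × Int => sc.1)).Nodup := by
    simpa only [PySem.Dict.keys] using hndupd
  rw [get?_pvMinIns_foldl (fun sc => sc.1) (fun sc => sc.2) upd.items d x hkeys2]
  rw [find?_items_eq_get? upd hndupd x, hupdget x]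
  cases hE : optMin (if x = p then some 1 else none) ((d.get? (x - p)).map (· + 1)) with
  | none =>
    simp only [Option.map_none]
    cases d.get? x with
    | none => rfl
    | some cx => rfl
  | some v =>
    simp only [Option.map_some]
    cases d.get? x with
    | none => rfl
    | some cx => rfl

-- the whole loop: best.get? x = mspec (reverse of the processed prefix) x
theorem loop_get? : ∀ (l : List Int) (d : PySem.Dict Int Int) (pre : List Int),
    d.keys.Nodup → (∀ x, d.get? x = mspec pre.reverse x) →
    ((l.foldl
        (fun (best : PySem.Dict Int Int) p =>
          (best.items.foldl (fun u sc => pvMinIns u (sc.1 + p) (sc.2 + 1))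
            ((PySem.Dict.empty).insert p 1)).items.foldl
            (fun b sc => pvMinIns b sc.1 sc.2) best)
        d).get? = fun x => mspec (pre ++ l).reverse x) := by
  intro l
  induction l with
  | nil => intro d pre hnd hinv; funext x; simpa using hinv x
  | cons p rest ih =>
    intro d pre hnd hinv
    simp only [List.foldl_cons]
    have hnd' : ((d.items.foldl (fun u sc => pvMinIns u (sc.1 + p) (sc.2 + 1))
        ((PySem.Dict.empty).insert p 1)).items.foldl
        (fun b sc => pvMinIns b sc.1 sc.2) d).keys.Nodup :=
      nodup_keys_pvMinIns_foldl (fun sc => sc.1) (fun sc => sc.2) _ d hnd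
    have hinv' : ∀ x, ((d.items.foldl (fun u sc => pvMinIns u (sc.1 + p) (sc.2 + 1))
        ((PySem.Dict.empty).insert p 1)).items.foldl
        (fun b sc => pvMinIns b sc.1 sc.2) d).get? x = mspec (pre ++ [p]).reverse x := by
      intro x
      rw [step_get? d hnd p x]
      have : (pre ++ [p]).reverse = p :: pre.reverse := by simp
      rw [this]
      simp only [mspec]
      rw [hinv x, hinv (x - p)]
    have := ih _ (pre ++ [p]) hnd' hinv'
    simpa using this

theorem B_good (l : List Int) (t : Int) : Good l t (get_minimal_length_for_n_piles_alt l t) := by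
  unfold get_minimal_length_for_n_piles_alt
  have hloop := loop_get? l PySem.Dict.empty [] PySem.Dict.nodup_keys_empty
    (by intro x; simp [PySem.Dict.get?_empty, mspec])
  simp only [List.nil_append] at hloop
  rw [PySem.Dict.getD_eq_get?_getD]
  have hget : (l.foldl
      (fun (best : PySem.Dict Int Int) p =>
        (best.items.foldl (fun u sc => pvMinIns u (sc.1 + p) (sc.2 + 1))
          ((PySem.Dict.empty).insert p 1)).items.foldl
          (fun b sc => pvMinIns b sc.1 sc.2) best)
      PySem.Dict.empty).get? t = mspec l.reverse t := by
    rw [hloop]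
  rw [hget]
  match hm : mspec l.reverse t with
  | some m =>
    have hr : Reach l t m := (Reach_reverse l t m).mp (mspec_reach l.reverse t m hm)
    constructor
    · exact Or.inl hr
    · intro c hc
      obtain ⟨m', hm'1, hm'2⟩ := reach_mspec l.reverse t c ((Reach_reverse l t c).mpr hc)
      rw [hm] at hm'1
      cases hm'1
      exact hm'2
  | none =>
    constructor
    · exact Or.inr rfl
    · intro c hc
      obtain ⟨m', hm'1, -⟩ := reach_mspec l.reverse t c ((Reach_reverse l t c).mpr hc)
      rw [hm] at hm'1
      cases hm'1

-- ===== VERDICT (by name: the statement is the Claim_ definition above) =====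
theorem get_minimal_length_for_n_piles_spec : Claim_equal_get_minimal_length_for_n_piles := by
  intro presents target_sum _
  unfold Spec_get_minimal_length_for_n_piles
  exact Good_unique (A_good presents target_sum) (B_good presents target_sum)
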